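-- pv_equiv track=rewrite | github.com/BarnabyShearer/aoc | aoc20231214a.py | aoc
-- ===== SOURCE A (Python) =====
-- from collections import defaultdict
--
-- def _parse(data):
--     square = set()
--     O = set()
--     for y, l in enumerate(data.split("\n")):
--         for x, c in enumerate(l):
--             if y == 0:
--                 square.add((x, -1))
--                 square.add((x, len(data.split("\n"))))
--             if c == "#":
--                 square.add((x, y))
--             if c == "O":
--                 O.add((x, y))
--         square.add((-1, y))
--         square.add((len(l), y))
--     return square, O
--
-- def parse(data):
--     height, width = len(data.split("\n")), len(data.split("\n")[0])
--     square, O = _parse(data)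
--     n, e, s, w = (
--         {"xx": 0, "yy": 1},
--         {"xx": -1, "yy": 0},
--         {"xx": 0, "yy": -1},
--         {"xx": 1, "yy": 0},
--     )
--     for (x, y) in square:
--         yy = y + 1
--         while (x, yy) not in square and yy < height:
--             n[(x, yy)] = (x, y)
--             yy += 1
--         yy = y - 1
--         while (x, yy) not in square and yy >= 0:
--             s[(x, yy)] = (x, y)
--             yy -= 1
--         xx = x + 1
--         while (xx, y) not in square and xx < width:
--             w[(xx, y)] = (x, y)
--             xx += 1
--         xx = x - 1
--         while (xx, y) not in square and xx >= 0:
--             e[(xx, y)] = (x, y)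
--             xx -= 1
--     return height, width, square, O, n, e, s, w
--
-- def aoc(data):
--     height, width, square, O, n, e, s, w = parse(data)
--
--     hit = defaultdict(lambda: 0)
--     for o in O:
--         hit[n[o]] += 1
--
--     total = 0
--     for x, y in square:
--         total += sum(height - 1 - y - yy for yy in range(hit[(x, y)]))
--     return total
-- ===== SOURCE B (Python) =====
-- def aoc(data):
--     lines = data.split("\n")
--     height = len(lines)
--     land = {}
--     total = 0
--     for y, l in enumerate(lines):
--         for x, c in enumerate(l):
--             if c == "#":
--                 land[x] = y + 1
--             elif c == "O":
--                 r = land.get(x, 0)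
--                 total += height - r
--                 land[x] = r + 1
--     return total
-- ===== Notes on version B (the rewrite author's own statement) =====
-- stated objective: faster
-- what changed: A builds border/rock sets, precomputes nearest-blocker maps for all four directions by per-square while-sweeps and then sums arithmetic series per blocker; B makes one row-major pass over the grid keeping, per column, the next landing row, adding each rock's load directly. Pre_ restricts to rectangular grids (all lines the same length): on ragged input A's border walls sit at each line's own length, so A raises KeyError or counts a phantom side-wall blocker.
-- outside the precondition, e.g. on aoc('#\n\nO'): A returns 1, B returns 2; on aoc('O\nOO'): A returns 4, B returns 5
import Mathlib
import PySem

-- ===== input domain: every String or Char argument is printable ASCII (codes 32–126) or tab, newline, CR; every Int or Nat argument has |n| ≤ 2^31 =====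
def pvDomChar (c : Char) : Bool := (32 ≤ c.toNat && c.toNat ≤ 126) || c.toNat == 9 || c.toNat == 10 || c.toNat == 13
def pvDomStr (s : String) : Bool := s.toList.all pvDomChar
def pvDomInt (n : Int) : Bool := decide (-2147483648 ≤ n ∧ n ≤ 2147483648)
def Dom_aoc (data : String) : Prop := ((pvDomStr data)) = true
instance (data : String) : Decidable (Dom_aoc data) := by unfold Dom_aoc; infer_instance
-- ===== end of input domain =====

-- B replaces A's four per-square while-sweep nearest-blocker maps and per-blocker series sums by a
-- single row-major scan keeping one landing row per column (asymptotically faster, O(cells)).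

-- ===== PORT A =====
-- data.split("\n"): the separator is never empty, so Python's split cannot raise; split? is always `some` here.
def pvLines (data : String) : List String := (PySem.Str.split? data "\n").getD []

-- one row of _parse's loop; the square set and the O set are updated independently,
-- so the loop body is split into a square-step and an O-step (same adds, same order).
def pvSqRow (H : Int) (sq : PySem.Set (Int × Int)) (yl : Int × String) : PySem.Set (Int × Int) :=
  (((PySem.List.enumerate yl.2.toList).foldl
      (fun sq xc =>
        let sq := if yl.1 = 0 then (sq.add (xc.1, -1)).add (xc.1, H) else sq
        if xc.2 = '#' then sq.add (xc.1, yl.1) else sq)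
      sq).add (-1, yl.1)).add (PySem.Str.len yl.2, yl.1)

def pvORow (O : PySem.Set (Int × Int)) (yl : Int × String) : PySem.Set (Int × Int) :=
  (PySem.List.enumerate yl.2.toList).foldl
    (fun O xc => if xc.2 = 'O' then O.add (xc.1, yl.1) else O) O

-- _parse(data)
def pvParseSets (data : String) : PySem.Set (Int × Int) × PySem.Set (Int × Int) :=
  let lines := pvLines data
  (PySem.List.enumerate lines).foldl
    (fun p yl => (pvSqRow (PySem.List.len lines) p.1 yl, pvORow p.2 yl))
    (PySem.Set.empty, PySem.Set.empty)

-- the four while-sweeps of parse; fuel equals the loop's maximal iteration count, so the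
-- recursion performs exactly the Python loop's steps
def pvSweepN (sq : PySem.Set (Int × Int)) (H x srcY : Int) :
    Int → PySem.Dict (Int × Int) (Int × Int) → Nat → PySem.Dict (Int × Int) (Int × Int)
  | _, n, 0 => n
  | yy, n, Nat.succ fuel =>
      if sq.contains (x, yy) = false ∧ yy < H then
        pvSweepN sq H x srcY (yy + 1) (n.insert (x, yy) (x, srcY)) fuel
      else n

def pvSweepS (sq : PySem.Set (Int × Int)) (x srcY : Int) :
    Int → PySem.Dict (Int × Int) (Int × Int) → Nat → PySem.Dict (Int × Int) (Int × Int)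
  | _, s, 0 => s
  | yy, s, Nat.succ fuel =>
      if sq.contains (x, yy) = false ∧ 0 ≤ yy then
        pvSweepS sq x srcY (yy - 1) (s.insert (x, yy) (x, srcY)) fuel
      else s

def pvSweepW (sq : PySem.Set (Int × Int)) (W y srcX : Int) :
    Int → PySem.Dict (Int × Int) (Int × Int) → Nat → PySem.Dict (Int × Int) (Int × Int)
  | _, w, 0 => w
  | xx, w, Nat.succ fuel =>
      if sq.contains (xx, y) = false ∧ xx < W then
        pvSweepW sq W y srcX (xx + 1) (w.insert (xx, y) (srcX, y)) fuel
      else w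

def pvSweepE (sq : PySem.Set (Int × Int)) (y srcX : Int) :
    Int → PySem.Dict (Int × Int) (Int × Int) → Nat → PySem.Dict (Int × Int) (Int × Int)
  | _, e, 0 => e
  | xx, e, Nat.succ fuel =>
      if sq.contains (xx, y) = false ∧ 0 ≤ xx then
        pvSweepE sq y srcX (xx - 1) (e.insert (xx, y) (srcX, y)) fuel
      else e

-- the n, e, s, w dicts of parse.  Python seeds each with two string-keyed direction constants
-- ("xx"/"yy"); those keys are never looked up at tuple keys and never affect any lookup the
-- program performs, and they are untypeable in Dict (Int × Int) _, so the dicts start empty.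
def pvDirs (sq : PySem.Set (Int × Int)) (H W : Int) :
    PySem.Dict (Int × Int) (Int × Int) × PySem.Dict (Int × Int) (Int × Int)
      × PySem.Dict (Int × Int) (Int × Int) × PySem.Dict (Int × Int) (Int × Int) :=
  sq.foldl
    (fun st b =>
      (pvSweepN sq H b.1 b.2 (b.2 + 1) st.1 ((H - (b.2 + 1)).toNat),
        (pvSweepE sq b.2 b.1 (b.1 - 1) st.2.1 b.1.toNat,
          (pvSweepS sq b.1 b.2 (b.2 - 1) st.2.2.1 b.2.toNat,
            pvSweepW sq W b.2 b.1 (b.1 + 1) st.2.2.2 ((W - (b.1 + 1)).toNat)))))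
    (PySem.Dict.empty, PySem.Dict.empty, PySem.Dict.empty, PySem.Dict.empty)

def aoc (data : String) : Int :=
  let lines := pvLines data
  let height : Int := PySem.List.len lines
  -- data.split("\n")[0]: split? never yields [], so the 0-index cannot raise; ported via total pyGetD
  let width : Int := PySem.Str.len (PySem.List.pyGetD lines 0 "")
  let sO := pvParseSets data
  let dirs := pvDirs sO.1 height width
  let n := dirs.1
  -- hit[n[o]] += 1: under Pre_aoc, n has a key for every o ∈ O (Python's n[o] raises only
  -- outside Pre_aoc); the lookup is ported in the total form (n.get? o).getD (0, 0)
  let hit := sO.2.foldl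
    (fun h o => h.insert ((n.get? o).getD (0, 0)) (h.getD ((n.get? o).getD (0, 0)) 0 + 1))
    PySem.Dict.empty
  sO.1.foldl
    (fun total b =>
      total + ((PySem.List.pyRange 0 (hit.getD b 0)).map (fun yy => height - 1 - b.2 - yy)).sum)
    0

-- ===== PORT B =====
def aoc_alt (data : String) : Int :=
  let lines := (PySem.Str.split? data "\n").getD []
  let height : Int := PySem.List.len lines
  ((PySem.List.enumerate lines).foldl
      (fun acc yl =>
        (PySem.List.enumerate yl.2.toList).foldl
          (fun acc xc =>
            if xc.2 = '#' then (acc.1, acc.2.insert xc.1 (yl.1 + 1))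
            else if xc.2 = 'O' then
              (acc.1 + (height - acc.2.getD xc.1 0), acc.2.insert xc.1 (acc.2.getD xc.1 0 + 1))
            else acc)
          acc)
      ((0 : Int), (PySem.Dict.empty : PySem.Dict Int Int))).1

-- ===== PRECONDITION & SPEC =====
-- Pre_aoc restricts to rectangular grids (every line as long as the first), the puzzle's input
-- format: on ragged lines A places its border walls at each line's own length, so A either
-- raises KeyError or counts a phantom side-wall blocker (e.g. "#\n\nO": A returns 1, B 2).
def Pre_aoc (data : String) : Prop :=
  ∀ l ∈ (PySem.Str.split? data "\n").getD [],
    l.toList.length = (((PySem.Str.split? data "\n").getD []).getD 0 "").toList.length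
instance (data : String) : Decidable (Pre_aoc data) := by unfold Pre_aoc; infer_instance

def pvWitness_aoc : String := "O#\n.O"

def Spec_aoc (data : String) (out : Int) : Prop := out = aoc_alt data
instance (data : String) (out : Int) : Decidable (Spec_aoc data out) := by unfold Spec_aoc; infer_instance

-- ===== CLAIM (what is proved, stated in full; the proofs are below) =====
def Claim_equal_aoc : Prop := ∀ (data : String), Dom_aoc data → Pre_aoc data → Spec_aoc data (aoc data)
-- ===== LEMMAS AND PROOFS =====

-- ---------- abstract grid notions ----------

def pvCell (ls : List String) (x y : Int) (c : Char) : Bool :=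
  decide (0 ≤ x) && decide (0 ≤ y) && decide (y < (ls.length : Int)) &&
  decide (x < ((ls.getD y.toNat "").toList.length : Int)) &&
  ((ls.getD y.toNat "").toList.getD x.toNat ' ' == c)

def pvW (ls : List String) : Int := ((ls.getD 0 "").toList.length : Int)

-- rectangularity, as Pre_aoc states it
def pvRect (ls : List String) : Prop := ∀ l ∈ ls, l.toList.length = (ls.getD 0 "").toList.length

-- membership in A's square set (rectangular case)
def pvIsSq (ls : List String) (k : Int × Int) : Bool :=
  (decide (0 ≤ k.1) && decide (k.1 < pvW ls) && (decide (k.2 = -1) || decide (k.2 = (ls.length : Int))))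
  || ((decide (k.1 = -1) || decide (k.1 = pvW ls)) && decide (0 ≤ k.2) && decide (k.2 < (ls.length : Int)))
  || pvCell ls k.1 k.2 '#'

-- last '#' row above y in column x (-1 = the top border)
def pvPB (ls : List String) (x : Int) (y : Nat) : Int :=
  (List.range y).foldl (fun acc j => if pvCell ls x (j : Int) '#' then (j : Int) else acc) (-1)

-- rocks strictly between that blocker and row y in column x
def pvRK (ls : List String) (x : Int) (y : Nat) : Int :=
  ((List.range y).countP (fun (j : Nat) => pvCell ls x (j : Int) 'O' && decide (pvPB ls x y < (j : Int))) : Nat)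

-- landing row of the next rock arriving in column x from row y
def pvLnd (ls : List String) (x : Int) (y : Nat) : Int := pvPB ls x y + 1 + pvRK ls x y

def pvRowSum (ls : List String) (y : Nat) : Int :=
  ((List.range (ls.getD y "").toList.length).map
    (fun (xk : Nat) => if pvCell ls (xk : Int) (y : Int) 'O' then (ls.length : Int) - pvLnd ls (xk : Int) y else 0)).sum

def pvTotal (ls : List String) : Int := ((List.range ls.length).map (fun y => pvRowSum ls y)).sum

def pvMid (ls : List String) (y : Nat) (x0 : Nat) (x : Int) : Int :=
  if 0 ≤ x ∧ x < (x0 : Int) then pvLnd ls x (y + 1) else pvLnd ls x y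

def pvTail (ls : List String) (y : Nat) (x0 : Nat) : Int :=
  ((List.range' x0 ((ls.getD y "").toList.length - x0)).map
    (fun (xk : Nat) => if pvCell ls (xk : Int) (y : Int) 'O' then (ls.length : Int) - pvLnd ls (xk : Int) y else 0)).sum

-- the two set folds of _parse, separated
def pvSqOf (ls : List String) : PySem.Set (Int × Int) :=
  (PySem.List.enumerate ls).foldl (fun s yl => pvSqRow (PySem.List.len ls) s yl) PySem.Set.empty
def pvOOf (ls : List String) : PySem.Set (Int × Int) :=
  (PySem.List.enumerate ls).foldl (fun s yl => pvORow s yl) PySem.Set.empty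

-- the n-dict of parse, separated
def pvNOf (ls : List String) : PySem.Dict (Int × Int) (Int × Int) :=
  (pvSqOf ls).foldl
    (fun n b => pvSweepN (pvSqOf ls) (ls.length : Int) b.1 b.2 (b.2 + 1) n (((ls.length : Int) - (b.2 + 1)).toNat))
    PySem.Dict.empty

-- no square in column x on rows a..b
def pvNoSq (sq : PySem.Set (Int × Int)) (x a b : Int) : Bool :=
  (PySem.List.pyRange a (b + 1)).all (fun j => !sq.contains (x, j))

-- "src is the square the sweep from which writes key k into n"
def pvCov (sq : PySem.Set (Int × Int)) (H : Int) (src k : Int × Int) : Prop :=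
  src.1 = k.1 ∧ src.2 < k.2 ∧ k.2 < H ∧ pvNoSq sq k.1 (src.2 + 1) k.2 = true

-- row-major rock list and its per-row nearest-blocker keys
def pvRocks (ls : List String) : List (Int × Int) :=
  (List.range ls.length).flatMap
    (fun y => (List.range (ls.getD y "").toList.length).filterMap
      (fun (xk : Nat) => if pvCell ls (xk : Int) (y : Int) 'O' then some ((xk : Int), (y : Int)) else none))

def pvRowKeys (ls : List String) (y : Nat) : List (Int × Int) :=
  (List.range (ls.getD y "").toList.length).filterMap
    (fun (xk : Nat) => if pvCell ls (xk : Int) (y : Int) 'O' then some ((xk : Int), pvPB ls (xk : Int) y) else none)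

def pvCovF (ls : List String) (o : Int × Int) : Int × Int := (o.1, pvPB ls o.1 o.2.toNat)

-- group-and-rank accumulator: processes keys in order, h applied to the key and how often it
-- appeared before
def pvRankSum (h : Int × Int → Int → Int) : List (Int × Int) → List (Int × Int) → Int
  | _, [] => 0
  | pre, b :: ks => h b ((pre.count b : Int)) + pvRankSum h (pre ++ [b]) ks

def pvHFun (ls : List String) (b : Int × Int) (c : Int) : Int := (ls.length : Int) - 1 - b.2 - c

-- ---------- generic fold lemmas ----------

theorem pv_mem_foldl {β : Type} (step : PySem.Set (Int × Int) → β → PySem.Set (Int × Int))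
    (Q : β → (Int × Int) → Prop)
    (hstep : ∀ s b k, k ∈ step s b ↔ k ∈ s ∨ Q b k) :
    ∀ (l : List β) (s : PySem.Set (Int × Int)) (k : Int × Int),
      k ∈ l.foldl step s ↔ k ∈ s ∨ ∃ b ∈ l, Q b k := by
  intro l
  induction l with
  | nil => intro s k; simp
  | cons b t ih =>
    intro s k
    simp only [List.foldl_cons, ih, hstep, List.mem_cons]
    constructor
    · rintro ((h | h) | ⟨b', hb', h⟩)
      · exact Or.inl h
      · exact Or.inr ⟨b, Or.inl rfl, h⟩
      · exact Or.inr ⟨b', Or.inr hb', h⟩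
    · rintro (h | ⟨b', (rfl | hb'), h⟩)
      · exact Or.inl (Or.inl h)
      · exact Or.inl (Or.inr h)
      · exact Or.inr ⟨b', hb', h⟩

theorem pv_nodup_foldl {β : Type} (step : PySem.Set (Int × Int) → β → PySem.Set (Int × Int))
    (hstep : ∀ s b, s.Nodup → (step s b).Nodup) :
    ∀ (l : List β) (s : PySem.Set (Int × Int)), s.Nodup → (l.foldl step s).Nodup := by
  intro l
  induction l with
  | nil => intro s h; simpa using h
  | cons b t ih => intro s h; exact ih (step s b) (hstep s b h)

theorem pv_sum_upd {f g : (Int × Int) → Int} :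
    ∀ (S : List (Int × Int)) (b0 : Int × Int), S.Nodup → b0 ∈ S →
      (∀ b ∈ S, b ≠ b0 → f b = g b) →
      (S.map f).sum = (S.map g).sum + (f b0 - g b0) := by
  intro S
  induction S with
  | nil => intro b0 _ h; simp at h
  | cons a t ih =>
    intro b0 hnd hmem hfg
    rcases List.mem_cons.1 hmem with rfl | hb0
    · have ht : ∀ b ∈ t, f b = g b := by
        intro b hb
        refine hfg b (List.mem_cons_of_mem _ hb) ?_
        rintro rfl
        exact (List.nodup_cons.1 hnd).1 hb
      rw [List.map_cons, List.map_cons, List.sum_cons, List.sum_cons,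
        List.map_congr_left ht]
      ring
    · have ha : f a = g a := by
        refine hfg a (List.mem_cons_self) ?_
        rintro rfl
        exact (List.nodup_cons.1 hnd).1 hb0
      rw [List.map_cons, List.map_cons, List.sum_cons, List.sum_cons, ha,
        ih b0 (List.nodup_cons.1 hnd).2 hb0 (fun b hb hne => hfg b (List.mem_cons_of_mem _ hb) hne)]
      ring

-- ---------- square / O membership ----------


theorem pvCell_nat (ls : List String) (xk y : Nat) (c : Char) :
    pvCell ls (xk : Int) (y : Int) c = true ↔
      y < ls.length ∧ xk < (ls.getD y "").toList.length ∧ (ls.getD y "").toList.getD xk ' ' = c := by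
  simp only [pvCell, Bool.and_eq_true, decide_eq_true_eq, beq_iff_eq, Int.toNat_natCast]
  constructor
  · rintro ⟨⟨⟨⟨-, -⟩, h3⟩, h4⟩, h5⟩
    exact ⟨by exact_mod_cast h3, by exact_mod_cast h4, h5⟩
  · rintro ⟨h3, h4, h5⟩
    exact ⟨⟨⟨⟨Int.natCast_nonneg xk, Int.natCast_nonneg y⟩, by exact_mod_cast h3⟩, by exact_mod_cast h4⟩, h5⟩

theorem pvCell_bounds (ls : List String) (x y : Int) (c : Char) (h : pvCell ls x y c = true) :
    0 ≤ x ∧ 0 ≤ y ∧ y < (ls.length : Int) ∧ x < ((ls.getD y.toNat "").toList.length : Int) := by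
  simp only [pvCell, Bool.and_eq_true, decide_eq_true_eq] at h
  exact ⟨h.1.1.1.1, h.1.1.1.2, h.1.1.2, h.1.2⟩

theorem pv_rect_rowlen (ls : List String) (hrect : pvRect ls) (y : Nat) (hy : y < ls.length) :
    (ls.getD y "").toList.length = (ls.getD 0 "").toList.length := by
  rw [List.getD_eq_getElem _ _ hy]
  exact hrect _ (List.getElem_mem hy)

theorem pvIsSq_iff (ls : List String) (k : Int × Int) :
    pvIsSq ls k = true ↔
      (0 ≤ k.1 ∧ k.1 < pvW ls ∧ (k.2 = -1 ∨ k.2 = (ls.length : Int)))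
      ∨ ((k.1 = -1 ∨ k.1 = pvW ls) ∧ 0 ≤ k.2 ∧ k.2 < (ls.length : Int))
      ∨ pvCell ls k.1 k.2 '#' = true := by
  unfold pvIsSq
  simp only [Bool.or_eq_true, Bool.and_eq_true, decide_eq_true_eq]
  tauto

theorem pv_sqRow_mem (H : Int) (sq : PySem.Set (Int × Int)) (yl : Int × String) (k : Int × Int) :
    k ∈ pvSqRow H sq yl ↔ k ∈ sq ∨
      ((∃ xc ∈ PySem.List.enumerate yl.2.toList,
          (yl.1 = 0 ∧ (k = (xc.1, -1) ∨ k = (xc.1, H))) ∨ (xc.2 = '#' ∧ k = (xc.1, yl.1)))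
        ∨ k = (-1, yl.1) ∨ k = (PySem.Str.len yl.2, yl.1)) := by
  unfold pvSqRow
  rw [PySem.Set.mem_add, PySem.Set.mem_add, pv_mem_foldl
      (Q := fun xc k => (yl.1 = 0 ∧ (k = (xc.1, -1) ∨ k = (xc.1, H))) ∨ (xc.2 = '#' ∧ k = (xc.1, yl.1)))]
  · simp only [or_assoc]
  · intro s xc k'
    by_cases h0 : yl.1 = 0 <;> by_cases hh : xc.2 = '#' <;>
      simp only [h0, hh, if_pos, if_neg, if_true, if_false, PySem.Set.mem_add, reduceIte] <;>
      tauto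

theorem pv_mem_sqOf (ls : List String) (hrect : pvRect ls) (k : Int × Int) :
    k ∈ pvSqOf ls ↔ pvIsSq ls k = true := by
  unfold pvSqOf
  rw [pv_mem_foldl
      (Q := fun yl k =>
        (∃ xc ∈ PySem.List.enumerate yl.2.toList,
            (yl.1 = 0 ∧ (k = (xc.1, -1) ∨ k = (xc.1, PySem.List.len ls))) ∨ (xc.2 = '#' ∧ k = (xc.1, yl.1)))
          ∨ k = (-1, yl.1) ∨ k = (PySem.Str.len yl.2, yl.1))
      (hstep := fun s yl k => pv_sqRow_mem (PySem.List.len ls) s yl k)]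
  obtain ⟨a, b⟩ := k
  constructor
  · rintro (h | ⟨yl, hyl, h⟩)
    · simp [PySem.Set.empty] at h
    · obtain ⟨yk, hyk, rfl⟩ := (PySem.List.mem_enumerate_iff _ _ _).1 hyl
      simp only [zero_add] at h
      rw [pvIsSq_iff]
      rcases h with ⟨xc, hxc, h⟩ | h | h
      · obtain ⟨xk, hxk, rfl⟩ := (PySem.List.mem_enumerate_iff _ _ _).1 hxc
        simp only [zero_add] at h
        rcases h with ⟨hy0, hk⟩ | ⟨hh, hk⟩
        · have hyk0 : yk = 0 := by exact_mod_cast hy0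
          subst hyk0
          have hW : ((xk : Int)) < pvW ls := by
            unfold pvW
            rw [← List.getD_eq_getElem ls "" hyk] at hxk
            exact_mod_cast hxk
          rcases hk with hk | hk
          · rw [hk]
            exact Or.inl ⟨Int.natCast_nonneg xk, hW, Or.inl rfl⟩
          · rw [hk]
            exact Or.inl ⟨Int.natCast_nonneg xk, hW, Or.inr (PySem.List.len_eq ls)⟩
        · rw [hk]
          refine Or.inr (Or.inr ?_)
          exact (pvCell_nat ls xk yk '#').2
            ⟨hyk, by rw [List.getD_eq_getElem ls "" hyk]; exact hxk,
              by rw [List.getD_eq_getElem ls "" hyk, List.getD_eq_getElem _ ' ' hxk]; exact hh⟩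
      · rw [h]
        exact Or.inr (Or.inl ⟨Or.inl rfl, Int.natCast_nonneg yk,
          show ((yk : Int)) < (ls.length : Int) by exact_mod_cast hyk⟩)
      · rw [h]
        have hW : PySem.Str.len ls[yk] = pvW ls := by
          rw [PySem.Str.len_eq]
          unfold pvW
          have hr := pv_rect_rowlen ls hrect yk hyk
          rw [List.getD_eq_getElem ls "" hyk] at hr
          exact_mod_cast hr
        exact Or.inr (Or.inl ⟨Or.inr hW, Int.natCast_nonneg yk,
          show ((yk : Int)) < (ls.length : Int) by exact_mod_cast hyk⟩)
  · intro hsq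
    right
    rw [pvIsSq_iff] at hsq
    rcases hsq with ⟨ha0, haW, hb⟩ | ⟨ha, hb0, hbH⟩ | hc
    · have hlen0 : 0 < (ls.getD 0 "").toList.length := by
        unfold pvW at haW; omega
      have hls : 0 < ls.length := by
        by_contra hl
        have hnil : ls = [] := List.eq_nil_of_length_eq_zero (by omega)
        subst hnil
        simp at hlen0
      refine ⟨(0, ls[0]), (PySem.List.mem_enumerate_iff _ _ _).2 ⟨0, hls, by simp⟩, ?_⟩
      left
      have hxk : a.toNat < ls[0].toList.length := by
        rw [← List.getD_eq_getElem ls "" hls]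
        unfold pvW at haW
        omega
      refine ⟨((a.toNat : Int), ls[0].toList[a.toNat]),
        (PySem.List.mem_enumerate_iff _ _ _).2 ⟨a.toNat, hxk, by simp⟩, ?_⟩
      left
      refine ⟨rfl, ?_⟩
      have haa : a = ((a.toNat : Int)) := by omega
      rcases hb with hb | hb
      · left
        have hb' : b = -1 := hb
        subst hb'
        exact congrArg (fun z : Int => (z, (-1 : Int))) haa
      · right
        have hb' : b = (ls.length : Int) := hb
        subst hb'
        exact congrArg (fun z : Int => (z, (ls.length : Int))) haa
    · have hyk : b.toNat < ls.length := by omega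
      refine ⟨((b.toNat : Int), ls[b.toNat]), (PySem.List.mem_enumerate_iff _ _ _).2 ⟨b.toNat, hyk, by simp⟩, ?_⟩
      right
      have hbb : b = ((b.toNat : Int)) := by omega
      rcases ha with ha | ha
      · left
        have ha' : a = -1 := ha
        subst ha'
        exact congrArg (fun z : Int => ((-1 : Int), z)) hbb
      · right
        have hW : PySem.Str.len ls[b.toNat] = pvW ls := by
          rw [PySem.Str.len_eq]
          unfold pvW
          have hr := pv_rect_rowlen ls hrect b.toNat hyk
          rw [List.getD_eq_getElem ls "" hyk] at hr
          exact_mod_cast hr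
        have ha' : a = pvW ls := ha
        subst ha'
        refine Prod.ext ?_ ?_
        · exact hW.symm
        · exact hbb
    · obtain ⟨h0a, h0b, hbl, hal⟩ := pvCell_bounds ls a b '#' hc
      have hyk : b.toNat < ls.length := by omega
      have hxk : a.toNat < ls[b.toNat].toList.length := by
        rw [← List.getD_eq_getElem ls "" hyk]
        omega
      refine ⟨((b.toNat : Int), ls[b.toNat]), (PySem.List.mem_enumerate_iff _ _ _).2 ⟨b.toNat, hyk, by simp⟩, ?_⟩
      left
      refine ⟨((a.toNat : Int), ls[b.toNat].toList[a.toNat]),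
        (PySem.List.mem_enumerate_iff _ _ _).2 ⟨a.toNat, hxk, by simp⟩, ?_⟩
      right
      constructor
      · simp only [pvCell, Bool.and_eq_true, beq_iff_eq] at hc
        rw [← List.getD_eq_getElem _ ' ' hxk, ← List.getD_eq_getElem ls "" hyk]
        exact hc.2
      · have he1 : a = ((a.toNat : Int)) := by omega
        have he2 : b = ((b.toNat : Int)) := by omega
        refine Prod.ext ?_ ?_
        · exact he1
        · exact he2

theorem pv_mem_OOf (ls : List String) (k : Int × Int) :
    k ∈ pvOOf ls ↔ pvCell ls k.1 k.2 'O' = true := by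
  unfold pvOOf
  have hstep : ∀ (s : PySem.Set (Int × Int)) (yl : Int × String) (k : Int × Int),
      k ∈ pvORow s yl ↔ k ∈ s ∨ ∃ xc ∈ PySem.List.enumerate yl.2.toList, xc.2 = 'O' ∧ k = (xc.1, yl.1) := by
    intro s yl k
    unfold pvORow
    rw [pv_mem_foldl (Q := fun xc k => xc.2 = 'O' ∧ k = (xc.1, yl.1))]
    intro s' xc k'
    by_cases h : xc.2 = 'O' <;> simp [h, PySem.Set.mem_add] <;> tauto
  rw [pv_mem_foldl _ _ hstep]
  obtain ⟨a, b⟩ := k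
  constructor
  · rintro (h | ⟨yl, hyl, xc, hxc, hO, hk⟩)
    · simp [PySem.Set.empty] at h
    · obtain ⟨yk, hyk, rfl⟩ := (PySem.List.mem_enumerate_iff _ _ _).1 hyl
      obtain ⟨xk, hxk, rfl⟩ := (PySem.List.mem_enumerate_iff _ _ _).1 hxc
      simp only [zero_add] at hO hk
      injection hk with h1 h2
      subst h1; subst h2
      rw [pvCell_nat]
      refine ⟨hyk, ?_, ?_⟩
      · rw [List.getD_eq_getElem ls "" hyk]; exact hxk
      · rw [List.getD_eq_getElem ls "" hyk, List.getD_eq_getElem _ ' ' hxk]; exact hO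
  · intro hc
    right
    obtain ⟨h0a, h0b, hbl, hal⟩ := pvCell_bounds ls a b 'O' hc
    have hyk : b.toNat < ls.length := by omega
    have hxk : a.toNat < ls[b.toNat].toList.length := by
      rw [← List.getD_eq_getElem ls "" hyk]; omega
    refine ⟨((b.toNat : Int), ls[b.toNat]), (PySem.List.mem_enumerate_iff _ _ _).2 ⟨b.toNat, hyk, by simp⟩,
      ((a.toNat : Int), ls[b.toNat].toList[a.toNat]),
      (PySem.List.mem_enumerate_iff _ _ _).2 ⟨a.toNat, hxk, by simp⟩, ?_, ?_⟩
    · simp only [pvCell, Bool.and_eq_true, beq_iff_eq] at hc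
      rw [← List.getD_eq_getElem _ ' ' hxk, ← List.getD_eq_getElem ls "" hyk]
      exact hc.2
    · have : ((a.toNat : Int)) = a ∧ ((b.toNat : Int)) = b := by omega
      rw [this.1, this.2]

theorem pv_nodup_sqOf (ls : List String) : (pvSqOf ls).Nodup := by
  unfold pvSqOf
  refine pv_nodup_foldl _ ?_ _ _ (by simp [PySem.Set.empty])
  intro s yl hs
  unfold pvSqRow
  refine PySem.Set.nodup_add _ _ (PySem.Set.nodup_add _ _ ?_)
  refine pv_nodup_foldl _ ?_ _ _ hs
  intro s' xc hs'
  by_cases h0 : yl.1 = 0 <;> by_cases hh : xc.2 = '#' <;>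
    simp only [h0, hh, reduceIte] <;>
    first
      | exact PySem.Set.nodup_add _ _ (PySem.Set.nodup_add _ _ (PySem.Set.nodup_add _ _ hs'))
      | exact PySem.Set.nodup_add _ _ (PySem.Set.nodup_add _ _ hs')
      | exact PySem.Set.nodup_add _ _ hs'
      | exact hs' 

theorem pv_nodup_OOf (ls : List String) : (pvOOf ls).Nodup := by
  unfold pvOOf
  refine pv_nodup_foldl _ ?_ _ _ (by simp [PySem.Set.empty])
  intro s yl hs
  unfold pvORow
  refine pv_nodup_foldl _ ?_ _ _ hs
  intro s' xc hs'
  by_cases h : xc.2 = 'O' <;> simp only [h, reduceIte]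
  · exact PySem.Set.nodup_add _ _ hs'
  · exact hs' 

-- ---------- pvPB / pvRK / pvLnd facts ----------

theorem pvPB_succ (ls : List String) (x : Int) (y : Nat) :
    pvPB ls x (y + 1) = if pvCell ls x (y : Int) '#' then (y : Int) else pvPB ls x y := by
  simp [pvPB, List.range_succ]

theorem pvPB_neg_one_le (ls : List String) (x : Int) (y : Nat) : -1 ≤ pvPB ls x y := by
  induction y with
  | zero => simp [pvPB]
  | succ y ih =>
    rw [pvPB_succ]
    split
    · omega
    · exact ih

theorem pvPB_lt (ls : List String) (x : Int) (y : Nat) : pvPB ls x y < (y : Int) := by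
  induction y with
  | zero => simp [pvPB]
  | succ y ih =>
    rw [pvPB_succ]
    split
    · omega
    · push_cast; push_cast at ih; omega

theorem pvPB_le_of_hash (ls : List String) (x : Int) (y j : Nat) (hj : j < y)
    (h : pvCell ls x (j : Int) '#' = true) : (j : Int) ≤ pvPB ls x y := by
  induction y with
  | zero => omega
  | succ y ih =>
    rw [pvPB_succ]
    rcases Nat.lt_succ_iff_lt_or_eq.1 hj with hj' | rfl
    · split
      · push_cast; omega
      · exact ih hj'
    · rw [if_pos h]

theorem pvPB_hash_or (ls : List String) (x : Int) (y : Nat) :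
    pvPB ls x y = -1 ∨ (0 ≤ pvPB ls x y ∧ pvCell ls x (pvPB ls x y) '#' = true) := by
  induction y with
  | zero => left; simp [pvPB]
  | succ y ih =>
    rw [pvPB_succ]
    by_cases h : pvCell ls x (y : Int) '#' = true
    · rw [if_pos h]
      right
      exact ⟨Int.natCast_nonneg y, by simpa using h⟩
    · rw [if_neg h]
      exact ih

theorem pvPB_mono (ls : List String) (x : Int) (y y' : Nat) (h : y ≤ y') :
    pvPB ls x y ≤ pvPB ls x y' := by
  induction y' with
  | zero => have : y = 0 := by omega
            subst this; exact le_refl _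
  | succ y' ih =>
    rcases Nat.le_succ_iff.1 h with h' | rfl
    · have h1 := ih h'
      rw [pvPB_succ]
      split
      · have := pvPB_lt ls x y'
        omega
      · exact h1
    · exact le_refl _

theorem pvPB_eq_of (ls : List String) (x : Int) (y j : Nat) (hj : j < y)
    (h : pvPB ls x y < (j : Int)) : pvPB ls x j = pvPB ls x y := by
  have h1 : pvPB ls x j ≤ pvPB ls x y := pvPB_mono ls x j y (le_of_lt hj)
  rcases pvPB_hash_or ls x y with h0 | ⟨hge, hh⟩
  · have := pvPB_neg_one_le ls x j
    omega
  · have e : ((pvPB ls x y).toNat : Int) = pvPB ls x y := by omega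
    have h2 := pvPB_le_of_hash ls x j (pvPB ls x y).toNat (by omega) (by rw [e]; exact hh)
    omega

theorem pv_not_cell_both (ls : List String) (x y : Int)
    (h1 : pvCell ls x y '#' = true) (h2 : pvCell ls x y 'O' = true) : False := by
  simp only [pvCell, Bool.and_eq_true, decide_eq_true_eq, beq_iff_eq] at h1 h2
  rw [h1.2] at h2
  exact absurd h2.2 (by decide)

theorem pvRK_succ (ls : List String) (x : Int) (y : Nat) :
    pvRK ls x (y + 1) =
      if pvCell ls x (y : Int) '#' then 0
      else pvRK ls x y + (if pvCell ls x (y : Int) 'O' then 1 else 0) := by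
  unfold pvRK
  rw [List.range_succ, List.countP_append]
  by_cases hc : pvCell ls x (y : Int) '#' = true
  · rw [if_pos hc]
    have h1 : (List.range y).countP
        (fun (j : Nat) => pvCell ls x (j : Int) 'O' && decide (pvPB ls x (y + 1) < (j : Int))) = 0 := by
      rw [List.countP_eq_zero]
      intro j hj
      have hjy : j < y := List.mem_range.1 hj
      rw [pvPB_succ, if_pos hc]
      simp only [Bool.and_eq_true, decide_eq_true_eq, not_and]
      intro _
      omega
    have h2 : List.countP
        (fun (j : Nat) => pvCell ls x (j : Int) 'O' && decide (pvPB ls x (y + 1) < (j : Int))) [y] = 0 := by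
      rw [List.countP_eq_zero]
      intro j hj
      have hje : j = y := by simpa using hj
      subst hje
      rw [pvPB_succ, if_pos hc]
      simp
    rw [h1, h2]
    simp
  · rw [if_neg hc]
    have hpb : pvPB ls x (y + 1) = pvPB ls x y := by rw [pvPB_succ, if_neg hc]
    simp only [hpb]
    have hlt : pvPB ls x y < (y : Int) := pvPB_lt ls x y
    by_cases ho : pvCell ls x (y : Int) 'O' = true
    · simp [ho, hlt]
    · simp [ho]

theorem pvLnd_succ (ls : List String) (x : Int) (y : Nat) :
    pvLnd ls x (y + 1) =
      if pvCell ls x (y : Int) '#' then (y : Int) + 1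
      else if pvCell ls x (y : Int) 'O' then pvLnd ls x y + 1
      else pvLnd ls x y := by
  unfold pvLnd
  rw [pvPB_succ, pvRK_succ]
  by_cases h1 : pvCell ls x (y : Int) '#' = true
  · rw [if_pos h1, if_pos h1, if_pos h1]; ring
  · rw [if_neg h1, if_neg h1, if_neg h1]
    by_cases h2 : pvCell ls x (y : Int) 'O' = true
    · rw [if_pos h2, if_pos h2]; ring
    · rw [if_neg h2, if_neg h2]; ring

theorem pvLnd_zero (ls : List String) (x : Int) : pvLnd ls x 0 = 0 := by
  simp [pvLnd, pvPB, pvRK]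

-- ---------- sweep / n-dict characterisation ----------

theorem pv_noSq_iff (sq : PySem.Set (Int × Int)) (x a b : Int) :
    pvNoSq sq x a b = true ↔ ∀ j : Int, a ≤ j → j ≤ b → ¬ (x, j) ∈ sq := by
  unfold pvNoSq
  rw [List.all_eq_true]
  constructor
  · intro h j h1 h2
    have := h j (PySem.List.mem_pyRange_one.2 ⟨h1, by omega⟩)
    simp only [Bool.not_eq_true'] at this
    rw [← PySem.Set.contains_iff, this]
    simp
  · intro h j hj
    obtain ⟨h1, h2⟩ := PySem.List.mem_pyRange_one.1 hj
    simp only [Bool.not_eq_true']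
    by_contra hc
    rw [Bool.not_eq_false, PySem.Set.contains_iff] at hc
    exact h j h1 (by omega) hc

theorem pvSweepN_get? (sq : PySem.Set (Int × Int)) (H x srcY : Int) :
    ∀ (fuel : Nat) (yy : Int) (n : PySem.Dict (Int × Int) (Int × Int)) (k : Int × Int),
      (H - yy).toNat ≤ fuel →
      (pvSweepN sq H x srcY yy n fuel).get? k =
        if (decide (k.1 = x) && decide (yy ≤ k.2) && decide (k.2 < H) && pvNoSq sq x yy k.2) = true
        then some (x, srcY) else n.get? k := by
  intro fuel
  induction fuel with
  | zero =>
    intro yy n k hfuel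
    have hcond : (decide (k.1 = x) && decide (yy ≤ k.2) && decide (k.2 < H) && pvNoSq sq x yy k.2) = false := by
      by_contra hc
      rw [Bool.not_eq_false] at hc
      simp only [Bool.and_eq_true, decide_eq_true_eq] at hc
      omega
    simp [pvSweepN, hcond]
  | succ fuel ih =>
    intro yy n k hfuel
    simp only [pvSweepN]
    by_cases hcond : sq.contains (x, yy) = false ∧ yy < H
    · rw [if_pos hcond]
      rw [ih (yy + 1) _ k (by omega)]
      by_cases hk : k = (x, yy)
      · subst hk
        have hf : (decide ((x, yy).1 = x) && decide (yy + 1 ≤ (x, yy).2) && decide ((x, yy).2 < H)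
            && pvNoSq sq x (yy + 1) (x, yy).2) = false := by
          simp only [Bool.and_eq_true, Bool.eq_false_iff, ne_eq, not_and, and_imp]
          intro _ h2
          simp only [decide_eq_true_eq] at h2
          omega
        rw [hf]
        have hnos : pvNoSq sq x yy (x, yy).2 = true := by
          rw [pv_noSq_iff]
          intro j hj1 hj2
          have hje : j = yy := by omega
          subst hje
          rw [← PySem.Set.contains_iff, hcond.1]
          simp
        have ht : (decide ((x, yy).1 = x) && decide (yy ≤ (x, yy).2) && decide ((x, yy).2 < H)
            && pvNoSq sq x yy (x, yy).2) = true := by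
          simp [hcond.2, hnos]
        rw [ht]
        simp [PySem.Dict.get?_insert_self]
      · have hne : (decide (k.1 = x) && decide (yy + 1 ≤ k.2) && decide (k.2 < H) && pvNoSq sq x (yy + 1) k.2)
            = (decide (k.1 = x) && decide (yy ≤ k.2) && decide (k.2 < H) && pvNoSq sq x yy k.2) := by
          rw [Bool.eq_iff_iff]
          simp only [Bool.and_eq_true, decide_eq_true_eq, pv_noSq_iff]
          constructor
          · rintro ⟨⟨⟨e1, e2⟩, e3⟩, e4⟩
            refine ⟨⟨⟨e1, by omega⟩, e3⟩, ?_⟩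
            intro j hj1 hj2
            rcases eq_or_lt_of_le hj1 with rfl | hlt
            · rw [← PySem.Set.contains_iff, hcond.1]; simp
            · exact e4 j (by omega) hj2
          · rintro ⟨⟨⟨e1, e2⟩, e3⟩, e4⟩
            have hk2 : k.2 ≠ yy := by
              intro hk2
              apply hk
              cases k
              simp_all
            refine ⟨⟨⟨e1, by omega⟩, e3⟩, fun j hj1 hj2 => e4 j (by omega) hj2⟩
        rw [hne, PySem.Dict.get?_insert_of_ne _ _ hk]
    · rw [if_neg hcond]
      have hf : (decide (k.1 = x) && decide (yy ≤ k.2) && decide (k.2 < H) && pvNoSq sq x yy k.2) = false := by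
        by_contra hc
        rw [Bool.not_eq_false] at hc
        simp only [Bool.and_eq_true, decide_eq_true_eq, pv_noSq_iff] at hc
        obtain ⟨⟨⟨e1, e2⟩, e3⟩, e4⟩ := hc
        apply hcond
        refine ⟨?_, by omega⟩
        rw [← Bool.not_eq_true, PySem.Set.contains_iff]
        exact e4 yy (le_refl _) e2
      rw [hf]
      simp

theorem pvCov_unique (sq : PySem.Set (Int × Int)) (H : Int) (src1 src2 k : Int × Int)
    (h1 : src1 ∈ sq) (h2 : src2 ∈ sq) (c1 : pvCov sq H src1 k) (c2 : pvCov sq H src2 k) :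
    src1 = src2 := by
  obtain ⟨e1, l1, u1, n1⟩ := c1
  obtain ⟨e2, l2, u2, n2⟩ := c2
  rw [pv_noSq_iff] at n1 n2
  have heq : src1.2 = src2.2 := by
    by_contra hne
    rcases lt_or_gt_of_ne hne with hlt | hlt
    · refine n1 src2.2 (by omega) (by omega) ?_
      have : (k.1, src2.2) = src2 := by
        cases src2; simp_all
      rw [this]; exact h2
    · refine n2 src1.2 (by omega) (by omega) ?_
      have : (k.1, src1.2) = src1 := by
        cases src1; simp_all
      rw [this]; exact h1
  cases src1; cases src2
  simp_all

theorem pv_foldN_some (sq : PySem.Set (Int × Int)) (H : Int) :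
    ∀ (L : List (Int × Int)) (n0 : PySem.Dict (Int × Int) (Int × Int)) (src k : Int × Int),
      (∀ b ∈ L, b ∈ sq) → src ∈ L → pvCov sq H src k →
      (L.foldl (fun n b => pvSweepN sq H b.1 b.2 (b.2 + 1) n ((H - (b.2 + 1)).toNat)) n0).get? k
        = some src := by
  have pres : ∀ (L : List (Int × Int)) (n0 : PySem.Dict (Int × Int) (Int × Int)) (k v : Int × Int),
      (∀ b ∈ L, pvCov sq H b k → b = v) → n0.get? k = some v →
      (L.foldl (fun n b => pvSweepN sq H b.1 b.2 (b.2 + 1) n ((H - (b.2 + 1)).toNat)) n0).get? k = some v := by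
    intro L
    induction L with
    | nil => intro n0 k v _ h0; simpa using h0
    | cons b t ih =>
      intro n0 k v hcov h0
      simp only [List.foldl_cons]
      refine ih _ k v (fun b' hb' => hcov b' (List.mem_cons_of_mem _ hb')) ?_
      rw [pvSweepN_get? sq H b.1 b.2 _ (b.2 + 1) n0 k (le_refl _)]
      by_cases hC : (decide (k.1 = b.1) && decide (b.2 + 1 ≤ k.2) && decide (k.2 < H) && pvNoSq sq b.1 (b.2 + 1) k.2) = true
      · rw [if_pos hC]
        simp only [Bool.and_eq_true, decide_eq_true_eq] at hC
        obtain ⟨⟨⟨e1, e2⟩, e3⟩, e4⟩ := hC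
        have : b = v := by
          refine hcov b List.mem_cons_self ⟨e1.symm, by omega, e3, ?_⟩
          rw [e1]
          exact e4
        rw [← this]
      · rw [if_neg hC]
        exact h0
  intro L
  induction L with
  | nil => intro n0 src k hL hsrc hcov; simp at hsrc
  | cons b t ih =>
    intro n0 src k hL hsrc hcov
    simp only [List.foldl_cons]
    rcases List.mem_cons.1 hsrc with rfl | hsrc'
    · refine pres t _ k src ?_ ?_
      · intro b' hb' hcov'
        exact pvCov_unique sq H b' src k (hL b' (List.mem_cons_of_mem _ hb')) (hL src List.mem_cons_self) hcov' hcov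
      · rw [pvSweepN_get? sq H src.1 src.2 _ (src.2 + 1) n0 k (le_refl _)]
        obtain ⟨e1, e2, e3, e4⟩ := hcov
        have hC : (decide (k.1 = src.1) && decide (src.2 + 1 ≤ k.2) && decide (k.2 < H) && pvNoSq sq src.1 (src.2 + 1) k.2) = true := by
          simp only [Bool.and_eq_true, decide_eq_true_eq]
          exact ⟨⟨⟨e1.symm, by omega⟩, e3⟩, by rw [e1]; exact e4⟩
        rw [if_pos hC]
    · exact ih _ src k (fun b' hb' => hL b' (List.mem_cons_of_mem _ hb')) hsrc' hcov

-- ---------- n at a rock, keys in the square ----------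

theorem pv_src_mem (ls : List String) (hrect : pvRect ls) (x : Int) (y : Nat)
    (hc : pvCell ls x (y : Int) 'O' = true) :
    pvIsSq ls (x, pvPB ls x y) = true := by
  obtain ⟨h0x, h0y, hyl, hxl⟩ := pvCell_bounds ls x (y : Int) 'O' hc
  rw [pvIsSq_iff]
  rcases pvPB_hash_or ls x y with hpb | ⟨hge, hh⟩
  · left
    have hxW : x < pvW ls := by
      unfold pvW
      have hr := pv_rect_rowlen ls hrect y (by exact_mod_cast hyl)
      simp only [Int.toNat_natCast] at hxl
      omega
    exact ⟨h0x, hxW, Or.inl hpb⟩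
  · exact Or.inr (Or.inr hh)

theorem pv_cov_rock (ls : List String) (hrect : pvRect ls) (x : Int) (y : Nat)
    (hc : pvCell ls x (y : Int) 'O' = true) :
    pvCov (pvSqOf ls) (ls.length : Int) (x, pvPB ls x y) (x, (y : Int)) := by
  obtain ⟨h0x, h0y, hyl, hxl⟩ := pvCell_bounds ls x (y : Int) 'O' hc
  refine ⟨rfl, pvPB_lt ls x y, hyl, ?_⟩
  rw [pv_noSq_iff]
  intro j hj1 hj2
  rw [pv_mem_sqOf ls hrect]
  intro hsq
  have hpbge := pvPB_neg_one_le ls x y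
  have hxW : x < pvW ls := by
    unfold pvW
    have hr := pv_rect_rowlen ls hrect y (by exact_mod_cast hyl)
    simp only [Int.toNat_natCast] at hxl
    omega
  rw [pvIsSq_iff] at hsq
  dsimp only at hsq
  rcases hsq with ⟨h1, h2, h3⟩ | ⟨h4, h5, h6⟩ | h7
  · rcases h3 with h3 | h3 <;> omega
  · rcases h4 with h4 | h4 <;> omega
  · rcases eq_or_lt_of_le hj2 with hje | hlt
    · rw [hje] at h7
      exact pv_not_cell_both ls x (y : Int) h7 hc
    · have hj0 : 0 ≤ j := by omega
      have hje : ((j.toNat : Int)) = j := by omega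
      have hple := pvPB_le_of_hash ls x y j.toNat (by omega) (by rw [hje]; exact h7)
      omega

theorem pv_n_at_rock (ls : List String) (hrect : pvRect ls) (x : Int) (y : Nat)
    (hc : pvCell ls x (y : Int) 'O' = true) :
    (pvNOf ls).get? (x, (y : Int)) = some (x, pvPB ls x y) := by
  unfold pvNOf
  refine pv_foldN_some (pvSqOf ls) (ls.length : Int) (pvSqOf ls) PySem.Dict.empty
    (x, pvPB ls x y) (x, (y : Int)) (fun b hb => hb) ?_ ?_
  · rw [pv_mem_sqOf ls hrect]
    exact pv_src_mem ls hrect x y hc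
  · exact pv_cov_rock ls hrect x y hc

-- ---------- rock lists ----------

theorem pv_mem_rocks (ls : List String) (k : Int × Int) :
    k ∈ pvRocks ls ↔ pvCell ls k.1 k.2 'O' = true := by
  unfold pvRocks
  obtain ⟨a, b⟩ := k
  rw [List.mem_flatMap]
  constructor
  · rintro ⟨y, hy, hk⟩
    rw [List.mem_filterMap] at hk
    obtain ⟨xk, hxk, hfx⟩ := hk
    by_cases hc : pvCell ls (xk : Int) (y : Int) 'O' = true
    · rw [if_pos hc] at hfx
      injection hfx with hfx
      injection hfx with h1 h2
      subst h1; subst h2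
      exact hc
    · rw [if_neg hc] at hfx
      cases hfx
  · intro hc
    obtain ⟨h0a, h0b, hbl, hal⟩ := pvCell_bounds ls a b 'O' hc
    have hyk : b.toNat < ls.length := by omega
    refine ⟨b.toNat, List.mem_range.2 hyk, ?_⟩
    rw [List.mem_filterMap]
    refine ⟨a.toNat, List.mem_range.2 (by omega), ?_⟩
    have he : ((a.toNat : Int)) = a ∧ ((b.toNat : Int)) = b := by omega
    rw [he.1, he.2, if_pos hc]

theorem pv_nodup_rocks (ls : List String) : (pvRocks ls).Nodup := by
  have hrow : ∀ (y : Nat), ((List.range (ls.getD y "").toList.length).filterMap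
      (fun (xk : Nat) => if pvCell ls (xk : Int) (y : Int) 'O' then some ((xk : Int), (y : Int)) else none)).Nodup := by
    intro y
    refine List.Nodup.filterMap ?_ List.nodup_range
    intro a a' b hb hb'
    simp only [Option.mem_def] at hb hb'
    by_cases hc : pvCell ls (a : Int) (y : Int) 'O' = true
    · by_cases hc' : pvCell ls (a' : Int) (y : Int) 'O' = true
      · rw [if_pos hc] at hb
        rw [if_pos hc'] at hb'
        injection hb with hb
        injection hb' with hb'
        have h1 : ((a : Int)) = b.1 := by rw [← hb]
        have h2 : ((a' : Int)) = b.1 := by rw [← hb']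
        have : ((a : Int)) = ((a' : Int)) := by omega
        exact_mod_cast this
      · rw [if_neg hc'] at hb'; cases hb'
    · rw [if_neg hc] at hb; cases hb
  have hsnd : ∀ (y : Nat) (k : Int × Int), k ∈ (List.range (ls.getD y "").toList.length).filterMap
      (fun (xk : Nat) => if pvCell ls (xk : Int) (y : Int) 'O' then some ((xk : Int), (y : Int)) else none) →
      k.2 = (y : Int) := by
    intro y k hk
    rw [List.mem_filterMap] at hk
    obtain ⟨xk, _, hfx⟩ := hk
    by_cases hc : pvCell ls (xk : Int) (y : Int) 'O' = true
    · rw [if_pos hc] at hfx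
      injection hfx with hfx
      rw [← hfx]
    · rw [if_neg hc] at hfx; cases hfx
  have main : ∀ m : Nat, ((List.range m).flatMap (fun y => (List.range (ls.getD y "").toList.length).filterMap
      (fun (xk : Nat) => if pvCell ls (xk : Int) (y : Int) 'O' then some ((xk : Int), (y : Int)) else none))).Nodup := by
    intro m
    induction m with
    | zero => simp
    | succ m ih =>
      rw [List.range_succ, List.flatMap_append, List.nodup_append]
      refine ⟨ih, by simpa using hrow m, ?_⟩
      intro a ha b hb
      rw [List.mem_flatMap] at ha
      obtain ⟨y, hy, ha⟩ := ha
      have ha2 : a.2 = (y : Int) := hsnd y a ha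
      have hb2 : b.2 = (m : Int) := by
        simp only [List.flatMap_cons, List.flatMap_nil, List.append_nil] at hb
        exact hsnd m b hb
      have hym : y < m := List.mem_range.1 hy
      intro he
      rw [he, hb2] at ha2
      omega
  exact main ls.length

theorem pv_perm_rocks (ls : List String) : (pvOOf ls).Perm (pvRocks ls) := by
  rw [List.perm_ext_iff_of_nodup (pv_nodup_OOf ls) (pv_nodup_rocks ls)]
  intro a
  rw [pv_mem_OOf, pv_mem_rocks]

theorem pv_rocks_map_cov (ls : List String) :
    (pvRocks ls).map (pvCovF ls) = (List.range ls.length).flatMap (pvRowKeys ls) := by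
  unfold pvRocks pvRowKeys
  rw [List.map_flatMap]
  have hr : ∀ y : Nat, (List.map (pvCovF ls) ((List.range (ls.getD y "").toList.length).filterMap
      (fun (xk : Nat) => if pvCell ls (xk : Int) (y : Int) 'O' then some ((xk : Int), (y : Int)) else none)))
      = (List.range (ls.getD y "").toList.length).filterMap
        (fun (xk : Nat) => if pvCell ls (xk : Int) (y : Int) 'O' then some ((xk : Int), pvPB ls (xk : Int) y) else none) := by
    intro y
    rw [List.map_filterMap]
    apply List.filterMap_congr
    intro xk _
    by_cases hc : pvCell ls (xk : Int) (y : Int) 'O' = true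
    · rw [if_pos hc, if_pos hc]
      simp [pvCovF]
    · rw [if_neg hc, if_neg hc]
      simp
  simp only [hr]

-- ---------- rank-sum lemmas ----------

theorem pvRankSum_append (h : Int × Int → Int → Int) :
    ∀ (K : List (Int × Int)) (pre : List (Int × Int)) (b : Int × Int),
      pvRankSum h pre (K ++ [b]) = pvRankSum h pre K + h b (((pre ++ K).count b : Int)) := by
  intro K
  induction K with
  | nil =>
    intro pre b
    simp [pvRankSum]
  | cons a K ih =>
    intro pre b
    simp only [List.cons_append, pvRankSum]
    rw [ih]
    simp only [List.append_assoc, List.singleton_append]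
    ring

theorem pvRankSum_split (h : Int × Int → Int → Int) :
    ∀ (K1 K2 pre : List (Int × Int)),
      pvRankSum h pre (K1 ++ K2) = pvRankSum h pre K1 + pvRankSum h (pre ++ K1) K2 := by
  intro K1
  induction K1 with
  | nil => intro K2 pre; simp [pvRankSum]
  | cons a K1 ih =>
    intro K2 pre
    simp only [List.cons_append, pvRankSum]
    rw [ih]
    simp only [List.append_assoc, List.singleton_append]
    ring

theorem pvRankSum_row (h : Int × Int → Int → Int) :
    ∀ (ks pre : List (Int × Int)), ks.Pairwise (fun a b => a.1 ≠ b.1) →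
      pvRankSum h pre ks = (ks.map (fun b => h b ((pre.count b : Int)))).sum := by
  intro ks
  induction ks with
  | nil => intro pre _; simp [pvRankSum]
  | cons b ks ih =>
    intro pre hpw
    obtain ⟨hhd, htl⟩ := List.pairwise_cons.1 hpw
    simp only [pvRankSum, List.map_cons, List.sum_cons]
    rw [ih _ htl]
    have hmap : ks.map (fun b' => h b' (((pre ++ [b]).count b' : Int)))
        = ks.map (fun b' => h b' ((pre.count b' : Int))) := by
      apply List.map_congr_left
      intro b' hb'
      have hne : ¬ ((b == b') = true) := by
        simp only [beq_iff_eq]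
        intro e
        exact hhd b' hb' (congrArg Prod.fst e)
      rw [List.count_append, List.count_singleton, if_neg hne, Nat.add_zero]
    rw [hmap]

theorem pv_regroup (h : Int × Int → Int → Int) :
    ∀ (K S : List (Int × Int)), S.Nodup → (∀ b ∈ K, b ∈ S) →
      (S.map (fun b => ((PySem.List.pyRange 0 ((K.count b : Int))).map (h b)).sum)).sum
        = pvRankSum h [] K := by
  intro K
  induction K using List.reverseRecOn with
  | nil =>
    intro S hnd hmem
    have h0 : PySem.List.pyRange 0 0 = ([] : List Int) := PySem.List.pyRange_one_eq_nil (le_refl 0)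
    simp [pvRankSum, h0]
  | append_singleton K b0 ih =>
    intro S hnd hmem
    have hb0 : b0 ∈ S := hmem b0 (by simp)
    have hKS : ∀ b ∈ K, b ∈ S := fun b hb => hmem b (by simp [hb])
    rw [pvRankSum_append, ← ih S hnd hKS]
    have hcount : ∀ b : Int × Int, b ≠ b0 → (K ++ [b0]).count b = K.count b := by
      intro b hne
      rw [List.count_append, List.count_singleton,
        if_neg (by simp only [beq_iff_eq]; intro e; exact hne e.symm), Nat.add_zero]
    have hcb0 : (K ++ [b0]).count b0 = K.count b0 + 1 := by
      rw [List.count_append, List.count_singleton, if_pos (by simp)]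
    rw [pv_sum_upd S b0 hnd hb0 (fun b hb hne => by rw [hcount b hne])]
    have hdelta : ((PySem.List.pyRange 0 (((K ++ [b0]).count b0 : Int))).map (h b0)).sum
        - ((PySem.List.pyRange 0 ((K.count b0 : Int))).map (h b0)).sum = h b0 ((K.count b0 : Int)) := by
      rw [hcb0]
      push_cast
      rw [PySem.List.pyRange_one_succ_right (Int.natCast_nonneg _)]
      rw [List.map_append, List.sum_append]
      simp
    rw [List.nil_append]
    linarith [hdelta]

-- ---------- per-row key counting ----------

theorem pv_rowKeys_pairwise (ls : List String) (y : Nat) :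
    (pvRowKeys ls y).Pairwise (fun a b => a.1 ≠ b.1) := by
  unfold pvRowKeys
  rw [List.pairwise_filterMap]
  refine List.Pairwise.imp ?_ List.pairwise_lt_range
  intro a a' hlt b hb b' hb'
  by_cases hc : pvCell ls (a : Int) (y : Int) 'O' = true
  · rw [if_pos hc] at hb
    injection hb with hb
    by_cases hc' : pvCell ls (a' : Int) (y : Int) 'O' = true
    · rw [if_pos hc'] at hb'
      injection hb' with hb'
      rw [← hb, ← hb']
      simp only [ne_eq]
      intro e
      have : a = a' := by exact_mod_cast e
      omega
    · rw [if_neg hc'] at hb'; cases hb'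
  · rw [if_neg hc] at hb; cases hb

theorem pv_countP_unique : ∀ (n : Nat) (p : Nat → Bool) (x0 : Nat), (∀ k, p k = true → k = x0) →
    (List.range n).countP p = if x0 < n ∧ p x0 = true then 1 else 0 := by
  intro n p x0 hu
  induction n with
  | zero => simp
  | succ n ih =>
    rw [List.range_succ, List.countP_append, ih]
    have hsing : List.countP p [n] = if p n = true then 1 else 0 := by
      simp [List.countP_cons]
    rw [hsing]
    by_cases hpx : p x0 = true
    · by_cases h1 : x0 < n
      · have hpn : ¬ p n = true := fun hpn => by have := hu n hpn; omega
        rw [if_pos ⟨h1, hpx⟩, if_neg hpn, if_pos ⟨by omega, hpx⟩]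
      · by_cases h2 : x0 = n
        · subst h2
          rw [if_neg (by rintro ⟨hh, -⟩; omega), if_pos hpx, if_pos ⟨by omega, hpx⟩]
        · have hpn : ¬ p n = true := fun hpn => h2 ((hu n hpn).symm)
          rw [if_neg (fun hh => h1 hh.1), if_neg hpn,
            if_neg (by rintro ⟨hh, -⟩; omega)]
    · have hpn : ¬ p n = true := fun hpn => hpx ((hu n hpn) ▸ hpn)
      rw [if_neg (fun hh => hpx hh.2), if_neg hpn, if_neg (fun hh => hpx hh.2)]

theorem pv_sum_ite (l : List Nat) (p : Nat → Bool) :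
    (l.map (fun a => if p a = true then (1 : Nat) else 0)).sum = l.countP p := by
  induction l with
  | nil => simp
  | cons a l ih =>
    rw [List.map_cons, List.sum_cons, List.countP_cons, ih]
    by_cases h : p a = true <;> simp [h] <;> omega

theorem pv_count_rowKeys (ls : List String) (j : Nat) (x : Int) (p : Int) :
    (pvRowKeys ls j).count (x, p) =
      if pvCell ls x (j : Int) 'O' = true ∧ pvPB ls x j = p then 1 else 0 := by
  unfold pvRowKeys
  rw [List.count_filterMap]
  by_cases hx : 0 ≤ x
  · have hxx : ((x.toNat : Int)) = x := by omega
    have huni : ∀ k : Nat, ((if pvCell ls (k : Int) (j : Int) 'O' then some ((k : Int), pvPB ls (k : Int) j) else none)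
        == some (x, p)) = true → k = x.toNat := by
      intro k hk
      by_cases hc : pvCell ls (k : Int) (j : Int) 'O' = true
      · rw [if_pos hc, beq_iff_eq] at hk
        injection hk with hk
        injection hk with hk1 hk2
        omega
      · rw [if_neg hc] at hk
        simp at hk
    rw [pv_countP_unique _ _ x.toNat huni]
    by_cases hc : pvCell ls x (j : Int) 'O' = true
    · have hcn : pvCell ls ((x.toNat : Int)) (j : Int) 'O' = true := by rw [hxx]; exact hc
      obtain ⟨-, -, -, hxl⟩ := pvCell_bounds ls x (j : Int) 'O' hc
      have hlt : x.toNat < (ls.getD j "").toList.length := by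
        simp only [Int.toNat_natCast] at hxl
        omega
      by_cases hp : pvPB ls x j = p
      · have hpred : ((if pvCell ls ((x.toNat : Int)) (j : Int) 'O' = true
            then some ((x.toNat : Int), pvPB ls ((x.toNat : Int)) j) else none) == some (x, p)) = true := by
          rw [if_pos hcn, beq_iff_eq, hxx, hp]
        rw [if_pos ⟨hlt, hpred⟩, if_pos ⟨hc, hp⟩]
      · rw [if_neg ?_, if_neg (fun hh => hp hh.2)]
        rintro ⟨-, hh⟩
        rw [if_pos hcn, beq_iff_eq, hxx] at hh
        injection hh with hh
        injection hh with hh1 hh2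
        exact hp hh2
    · rw [if_neg ?_, if_neg (fun hh => hc hh.1)]
      rintro ⟨-, hh⟩
      rw [if_neg (fun hcc : pvCell ls ((x.toNat : Int)) (j : Int) 'O' = true => hc (by rw [hxx] at hcc; exact hcc))] at hh
      simp at hh
  · have h1 : (List.range (ls.getD j "").toList.length).countP
        (fun (k : Nat) => ((if pvCell ls (k : Int) (j : Int) 'O' then some ((k : Int), pvPB ls (k : Int) j) else none)
          == some (x, p))) = 0 := by
      rw [List.countP_eq_zero]
      intro k _
      by_cases hc : pvCell ls (k : Int) (j : Int) 'O' = true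
      · rw [if_pos hc]
        simp only [beq_iff_eq]
        intro e
        injection e with e
        injection e with e1 e2
        omega
      · rw [if_neg hc]
        simp
    have h2 : ¬ (pvCell ls x (j : Int) 'O' = true ∧ pvPB ls x j = p) := by
      rintro ⟨hc, -⟩
      obtain ⟨h0, -, -, -⟩ := pvCell_bounds ls x (j : Int) 'O' hc
      omega
    rw [h1, if_neg h2]

theorem pv_count_prefix (ls : List String) (y : Nat) (x : Int) :
    (((List.range y).flatMap (pvRowKeys ls)).count (x, pvPB ls x y) : Int) = pvRK ls x y := by
  rw [List.count_flatMap]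
  have hmap : (List.map (List.count (x, pvPB ls x y) ∘ pvRowKeys ls) (List.range y))
      = (List.range y).map (fun (j : Nat) => if (pvCell ls x (j : Int) 'O' && decide (pvPB ls x y < (j : Int))) = true
          then (1 : Nat) else 0) := by
    apply List.map_congr_left
    intro j hj
    have hjy : j < y := List.mem_range.1 hj
    simp only [Function.comp_apply]
    rw [pv_count_rowKeys ls j x (pvPB ls x y)]
    by_cases hc : pvCell ls x (j : Int) 'O' = true
    · by_cases hlt : pvPB ls x y < (j : Int)
      · rw [if_pos ⟨hc, pvPB_eq_of ls x y j hjy hlt⟩, if_pos (by simp [hc, hlt])]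
      · have hne : pvPB ls x j ≠ pvPB ls x y := by
          intro e
          apply hlt
          have := pvPB_lt ls x j
          omega
        rw [if_neg (fun hh => hne hh.2), if_neg (by simp [hlt])]
    · rw [if_neg (fun hh => hc hh.1), if_neg (by simp [hc])]
  rw [hmap, pv_sum_ite]
  unfold pvRK
  rfl

-- ---------- A-side assembly ----------

theorem pv_sum_map_filterMap : ∀ (l : List Nat) (f : Nat → Option (Int × Int)) (g : Int × Int → Int),
    ((l.filterMap f).map g).sum = (l.map (fun a => ((f a).map g).getD 0)).sum := by
  intro l
  induction l with
  | nil => intro f g; simp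
  | cons a l ih =>
    intro f g
    rw [List.filterMap_cons]
    cases hfa : f a <;> simp [hfa, ih]

theorem pv_rowKeys_sum (ls : List String) (y : Nat) :
    ((pvRowKeys ls y).map (fun b => pvHFun ls b ((((List.range y).flatMap (pvRowKeys ls)).count b : Int)))).sum
      = pvRowSum ls y := by
  unfold pvRowKeys pvRowSum
  rw [pv_sum_map_filterMap]
  apply congrArg List.sum
  apply List.map_congr_left
  intro xk _
  by_cases hc : pvCell ls (xk : Int) (y : Int) 'O' = true
  · rw [if_pos hc, if_pos hc]
    simp only [Option.map_some, Option.getD_some]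
    have hcp := pv_count_prefix ls y ((xk : Int))
    unfold pvRowKeys at hcp
    rw [hcp]
    unfold pvHFun pvLnd
    ring
  · rw [if_neg hc, if_neg hc]
    simp

theorem pv_rowpeel (ls : List String) :
    ∀ m : Nat,
      pvRankSum (pvHFun ls) [] ((List.range m).flatMap (pvRowKeys ls))
        = ((List.range m).map
            (fun y => ((pvRowKeys ls y).map
              (fun b => pvHFun ls b ((((List.range y).flatMap (pvRowKeys ls)).count b : Int)))).sum)).sum := by
  intro m
  induction m with
  | zero => simp [pvRankSum]
  | succ m ih =>
    rw [List.range_succ, List.flatMap_append, pvRankSum_split, ih,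
      List.map_append, List.sum_append]
    congr 1
    have hfm : (([m] : List Nat).flatMap (pvRowKeys ls)) = pvRowKeys ls m := by simp
    rw [List.nil_append, hfm, pvRankSum_row (pvHFun ls) _ _ (pv_rowKeys_pairwise ls m)]
    simp

theorem pv_parseSets_eq (data : String) :
    pvParseSets data = (pvSqOf (pvLines data), pvOOf (pvLines data)) := by
  unfold pvParseSets pvSqOf pvOOf
  exact PySem.List.foldl_prod_mk (fun s yl => pvSqRow (PySem.List.len (pvLines data)) s yl)
    (fun s yl => pvORow s yl) _ _ _

theorem pvDirs_fst (sq : PySem.Set (Int × Int)) (H W : Int) :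
    (pvDirs sq H W).1 = sq.foldl
      (fun n b => pvSweepN sq H b.1 b.2 (b.2 + 1) n ((H - (b.2 + 1)).toNat)) PySem.Dict.empty := by
  unfold pvDirs
  rw [PySem.List.foldl_prod_mk
    (fun n (b : Int × Int) => pvSweepN sq H b.1 b.2 (b.2 + 1) n ((H - (b.2 + 1)).toNat))
    (fun st2 (b : Int × Int) => (pvSweepE sq b.2 b.1 (b.1 - 1) st2.1 b.1.toNat,
      (pvSweepS sq b.1 b.2 (b.2 - 1) st2.2.1 b.2.toNat,
        pvSweepW sq W b.2 b.1 (b.1 + 1) st2.2.2 ((W - (b.1 + 1)).toNat)))) sq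
    PySem.Dict.empty (PySem.Dict.empty, PySem.Dict.empty, PySem.Dict.empty)]

theorem pv_aoc_eq (data : String) (hPre : Pre_aoc data) : aoc data = pvTotal (pvLines data) := by
  have hrect : pvRect (pvLines data) := hPre
  simp only [aoc, pv_parseSets_eq data, PySem.List.len_eq]
  have hN : (pvDirs (pvSqOf (pvLines data), pvOOf (pvLines data)).1 ((pvLines data).length : Int)
      (PySem.Str.len (PySem.List.pyGetD (pvLines data) 0 ""))).1 = pvNOf (pvLines data) := by
    rw [pvDirs_fst]
    rfl
  rw [hN]
  have hO : ∀ o ∈ pvOOf (pvLines data), ((pvNOf (pvLines data)).get? o).getD (0, 0) = pvCovF (pvLines data) o := by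
    intro o ho
    rw [pv_mem_OOf] at ho
    obtain ⟨h0x, h0y, -, -⟩ := pvCell_bounds (pvLines data) o.1 o.2 'O' ho
    have he : ((o.2.toNat : Int)) = o.2 := by omega
    have hc : pvCell (pvLines data) o.1 ((o.2.toNat : Int)) 'O' = true := by rw [he]; exact ho
    have hn := pv_n_at_rock (pvLines data) hrect o.1 o.2.toNat hc
    have ho2 : (o.1, ((o.2.toNat : Int))) = o := by
      obtain ⟨a, b⟩ := o
      simp only [Prod.mk.injEq, true_and]
      exact he
    rw [ho2] at hn
    rw [hn]
    rfl
  have hhit : ∀ b : Int × Int,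
      (List.foldl (fun h o => h.insert (((pvNOf (pvLines data)).get? o).getD (0, 0))
          (h.getD (((pvNOf (pvLines data)).get? o).getD (0, 0)) 0 + 1))
        PySem.Dict.empty (pvOOf (pvLines data))).getD b 0
      = ((((List.range (pvLines data).length).flatMap (pvRowKeys (pvLines data))).count b : Nat) : Int) := by
    intro b
    rw [← List.foldl_map (f := fun o => ((pvNOf (pvLines data)).get? o).getD (0, 0))
      (g := fun (h : PySem.Dict (Int × Int) Int) k => h.insert k (h.getD k 0 + 1))]
    rw [List.map_congr_left hO]
    rw [PySem.Dict.getD_foldl_insert_add_one]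
    rw [PySem.Dict.getD_empty]
    rw [List.Perm.count_eq (List.Perm.map (pvCovF (pvLines data)) (pv_perm_rocks (pvLines data))) b]
    rw [pv_rocks_map_cov (pvLines data)]
    rw [zero_add]
  simp only [hhit]
  rw [PySem.List.foldl_add]
  have hfun : ∀ b : Int × Int, (fun yy => ((pvLines data).length : Int) - 1 - b.2 - yy) = pvHFun (pvLines data) b :=
    fun b => funext fun yy => rfl
  simp only [hfun]
  have hkeys : ∀ b ∈ (List.range (pvLines data).length).flatMap (pvRowKeys (pvLines data)),
      b ∈ pvSqOf (pvLines data) := by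
    intro b hb
    rw [List.mem_flatMap] at hb
    obtain ⟨y, _, hb⟩ := hb
    unfold pvRowKeys at hb
    rw [List.mem_filterMap] at hb
    obtain ⟨xk, _, hfx⟩ := hb
    by_cases hc : pvCell (pvLines data) (xk : Int) (y : Int) 'O' = true
    · rw [if_pos hc] at hfx
      injection hfx with hfx
      subst hfx
      rw [pv_mem_sqOf (pvLines data) hrect]
      exact pv_src_mem (pvLines data) hrect (xk : Int) y hc
    · rw [if_neg hc] at hfx; cases hfx
  rw [pv_regroup (pvHFun (pvLines data)) _ (pvSqOf (pvLines data)) (pv_nodup_sqOf (pvLines data)) hkeys]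
  rw [pv_rowpeel (pvLines data) (pvLines data).length]
  simp only [pv_rowKeys_sum]
  rw [zero_add]
  rfl

-- ---------- B-side assembly ----------

theorem pv_lnd_nocell (ls : List String) (y : Nat) (x : Int)
    (h : ¬ (0 ≤ x ∧ x < ((ls.getD y "").toList.length : Int))) :
    pvLnd ls x (y + 1) = pvLnd ls x y := by
  have h1 : ∀ c : Char, pvCell ls x (y : Int) c = false := by
    intro c
    by_contra hc
    rw [Bool.not_eq_false] at hc
    obtain ⟨a, -, -, dd⟩ := pvCell_bounds ls x (y : Int) c hc
    simp only [Int.toNat_natCast] at dd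
    exact h ⟨a, dd⟩
  rw [pvLnd_succ]
  simp [h1]

theorem pv_mid_full (ls : List String) (y : Nat) (x : Int) :
    pvMid ls y ((ls.getD y "").toList.length) x = pvLnd ls x (y + 1) := by
  unfold pvMid
  by_cases hx : 0 ≤ x ∧ x < (((ls.getD y "").toList.length : Nat) : Int)
  · rw [if_pos hx]
  · rw [if_neg hx, pv_lnd_nocell ls y x hx]

theorem pvTail_cons (ls : List String) (y : Nat) (x0 : Nat) (hx0 : x0 < (ls.getD y "").toList.length) :
    pvTail ls y x0 = (if pvCell ls (x0 : Int) (y : Int) 'O' then (ls.length : Int) - pvLnd ls (x0 : Int) y else 0)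
      + pvTail ls y (x0 + 1) := by
  unfold pvTail
  rw [show (ls.getD y "").toList.length - x0 = ((ls.getD y "").toList.length - (x0 + 1)) + 1 from by omega,
    List.range'_succ, List.map_cons, List.sum_cons]

theorem pvTail_zero (ls : List String) (y : Nat) : pvTail ls y 0 = pvRowSum ls y := by
  unfold pvTail pvRowSum
  rw [List.range_eq_range', Nat.sub_zero]

theorem pv_B_row (ls : List String) (y : Nat) (hy : y < ls.length) :
    ∀ (cs : List Char) (x0 : Nat), cs = (ls.getD y "").toList.drop x0 →
    ∀ (tot : Int) (d : PySem.Dict Int Int), (∀ x : Int, d.getD x 0 = pvMid ls y x0 x) →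
      ((PySem.List.enumerate cs (x0 : Int)).foldl
        (fun acc xc =>
          if xc.2 = '#' then (acc.1, acc.2.insert xc.1 (((y : Int)) + 1))
          else if xc.2 = 'O' then
            (acc.1 + ((ls.length : Int) - acc.2.getD xc.1 0), acc.2.insert xc.1 (acc.2.getD xc.1 0 + 1))
          else acc)
        (tot, d)).1 = tot + pvTail ls y x0 ∧
      ∀ x : Int, ((PySem.List.enumerate cs (x0 : Int)).foldl
        (fun acc xc =>
          if xc.2 = '#' then (acc.1, acc.2.insert xc.1 (((y : Int)) + 1))
          else if xc.2 = 'O' then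
            (acc.1 + ((ls.length : Int) - acc.2.getD xc.1 0), acc.2.insert xc.1 (acc.2.getD xc.1 0 + 1))
          else acc)
        (tot, d)).2.getD x 0 = pvMid ls y (ls.getD y "").toList.length x := by
  intro cs
  induction cs with
  | nil =>
    intro x0 hcs tot d hd
    have hlen : (ls.getD y "").toList.length ≤ x0 := List.drop_eq_nil_iff.1 hcs.symm
    constructor
    · simp only [PySem.List.enumerate_nil, List.foldl_nil]
      unfold pvTail
      rw [show (ls.getD y "").toList.length - x0 = 0 from by omega]
      simp
    · intro x
      simp only [PySem.List.enumerate_nil, List.foldl_nil]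
      rw [hd x]
      unfold pvMid
      by_cases hx : 0 ≤ x ∧ x < (((ls.getD y "").toList.length : Nat) : Int)
      · rw [if_pos hx, if_pos ⟨hx.1, by omega⟩]
      · rw [if_neg hx]
        by_cases hx2 : 0 ≤ x ∧ x < (x0 : Int)
        · rw [if_pos hx2]
          exact pv_lnd_nocell ls y x hx
        · rw [if_neg hx2]
  | cons c cs ih =>
    intro x0 hcs tot d hd
    have hx0 : x0 < (ls.getD y "").toList.length := by
      have hlen := congrArg List.length hcs
      simp only [List.length_cons, List.length_drop] at hlen
      omega
    have hhead : (ls.getD y "").toList[x0]? = some c := by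
      have h0 := List.getElem?_drop (xs := (ls.getD y "").toList) (i := x0) (j := 0)
      rw [← hcs] at h0
      simpa using h0.symm
    have hgetD : (ls.getD y "").toList.getD x0 ' ' = c := by
      rw [List.getD_eq_getElem _ _ hx0]
      have h0 := hhead
      rw [List.getElem?_eq_getElem hx0] at h0
      injection h0
    have htail : cs = (ls.getD y "").toList.drop (x0 + 1) := by
      rw [← List.tail_drop, ← hcs]
      rfl
    have hcellc : pvCell ls (x0 : Int) (y : Int) c = true :=
      (pvCell_nat ls x0 y c).2 ⟨hy, hx0, hgetD⟩
    have hcellne : ∀ ch : Char, c ≠ ch → pvCell ls (x0 : Int) (y : Int) ch = false := by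
      intro ch hne
      by_contra hc
      rw [Bool.not_eq_false] at hc
      have := (pvCell_nat ls x0 y ch).1 hc
      exact hne (hgetD ▸ this.2.2)
    have hcast : ((x0 : Int) + 1) = (((x0 + 1 : Nat)) : Int) := by push_cast; ring
    rw [PySem.List.enumerate_cons, List.foldl_cons]
    dsimp only
    by_cases hC1 : c = '#'
    · subst hC1
      rw [if_pos rfl]
      have hd' : ∀ x : Int, (d.insert (x0 : Int) ((y : Int) + 1)).getD x 0 = pvMid ls y (x0 + 1) x := by
        intro x
        rw [PySem.Dict.getD_insert]
        by_cases hx : x = (x0 : Int)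
        · rw [if_pos hx, hx]
          unfold pvMid
          rw [if_pos ⟨Int.natCast_nonneg x0, by push_cast; omega⟩]
          rw [pvLnd_succ, if_pos hcellc]
        · rw [if_neg hx, hd x]
          unfold pvMid
          by_cases h0x : 0 ≤ x
          · by_cases hlt : x < (x0 : Int)
            · rw [if_pos ⟨h0x, hlt⟩, if_pos ⟨h0x, by push_cast; omega⟩]
            · rw [if_neg (fun hh => hlt hh.2), if_neg (by rintro ⟨-, hh⟩; push_cast at hh; omega)]
          · rw [if_neg (fun hh => h0x hh.1), if_neg (fun hh => h0x hh.1)]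
      obtain ⟨ih1, ih2⟩ := ih (x0 + 1) htail tot (d.insert (x0 : Int) ((y : Int) + 1)) hd'
      rw [hcast]
      refine ⟨?_, ih2⟩
      rw [ih1, pvTail_cons ls y x0 hx0]
      rw [if_neg (by rw [hcellne 'O' (by decide)]; simp)]
      ring
    · by_cases hC2 : c = 'O'
      · subst hC2
        rw [if_neg (by decide : ¬ ('O' = '#')), if_pos rfl]
        have hdx0 : d.getD (x0 : Int) 0 = pvLnd ls (x0 : Int) y := by
          rw [hd ((x0 : Int))]
          unfold pvMid
          rw [if_neg (by rintro ⟨-, hh⟩; omega)]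
        have hd' : ∀ x : Int, (d.insert (x0 : Int) (d.getD (x0 : Int) 0 + 1)).getD x 0 = pvMid ls y (x0 + 1) x := by
          intro x
          rw [PySem.Dict.getD_insert]
          by_cases hx : x = (x0 : Int)
          · rw [if_pos hx, hx, hdx0]
            unfold pvMid
            rw [if_pos ⟨Int.natCast_nonneg x0, by push_cast; omega⟩]
            rw [pvLnd_succ, if_neg (by rw [hcellne '#' (by decide)]; simp), if_pos hcellc]
          · rw [if_neg hx, hd x]
            unfold pvMid
            by_cases h0x : 0 ≤ x
            · by_cases hlt : x < (x0 : Int)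
              · rw [if_pos ⟨h0x, hlt⟩, if_pos ⟨h0x, by push_cast; omega⟩]
              · rw [if_neg (fun hh => hlt hh.2), if_neg (by rintro ⟨-, hh⟩; push_cast at hh; omega)]
            · rw [if_neg (fun hh => h0x hh.1), if_neg (fun hh => h0x hh.1)]
        obtain ⟨ih1, ih2⟩ := ih (x0 + 1) htail (tot + ((ls.length : Int) - d.getD (x0 : Int) 0))
          (d.insert (x0 : Int) (d.getD (x0 : Int) 0 + 1)) hd'
        rw [hcast]
        refine ⟨?_, ih2⟩
        rw [ih1, pvTail_cons ls y x0 hx0, if_pos hcellc, hdx0]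
        ring
      · rw [if_neg (show ¬ (c = '#') from hC1), if_neg (show ¬ (c = 'O') from hC2)]
        have hd' : ∀ x : Int, d.getD x 0 = pvMid ls y (x0 + 1) x := by
          intro x
          rw [hd x]
          unfold pvMid
          by_cases hx : x = (x0 : Int)
          · rw [hx]
            rw [if_neg (by rintro ⟨-, hh⟩; omega), if_pos ⟨Int.natCast_nonneg x0, by push_cast; omega⟩]
            rw [pvLnd_succ, if_neg (by rw [hcellne '#' hC1]; simp), if_neg (by rw [hcellne 'O' hC2]; simp)]
          · by_cases h0x : 0 ≤ x
            · by_cases hlt : x < (x0 : Int)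
              · rw [if_pos ⟨h0x, hlt⟩, if_pos ⟨h0x, by push_cast; omega⟩]
              · rw [if_neg (fun hh => hlt hh.2), if_neg (by rintro ⟨-, hh⟩; push_cast at hh; omega)]
            · rw [if_neg (fun hh => h0x hh.1), if_neg (fun hh => h0x hh.1)]
        obtain ⟨ih1, ih2⟩ := ih (x0 + 1) htail tot d hd'
        rw [hcast]
        refine ⟨?_, ih2⟩
        rw [ih1, pvTail_cons ls y x0 hx0]
        rw [if_neg (by rw [hcellne 'O' hC2]; simp)]
        ring

theorem pv_B_rows (ls : List String) :
    ∀ (rows : List String) (y0 : Nat), rows = ls.drop y0 →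
    ∀ (tot : Int) (d : PySem.Dict Int Int), (∀ x : Int, d.getD x 0 = pvLnd ls x y0) →
      ((PySem.List.enumerate rows (y0 : Int)).foldl
        (fun acc yl =>
          (PySem.List.enumerate yl.2.toList).foldl
            (fun acc xc =>
              if xc.2 = '#' then (acc.1, acc.2.insert xc.1 (yl.1 + 1))
              else if xc.2 = 'O' then
                (acc.1 + ((ls.length : Int) - acc.2.getD xc.1 0), acc.2.insert xc.1 (acc.2.getD xc.1 0 + 1))
              else acc)
            acc)
        (tot, d)).1
      = tot + ((List.range' y0 (ls.length - y0)).map (fun y => pvRowSum ls y)).sum := by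
  intro rows
  induction rows with
  | nil =>
    intro y0 hrows tot d hd
    have hlen : ls.length ≤ y0 := List.drop_eq_nil_iff.1 hrows.symm
    simp only [PySem.List.enumerate_nil, List.foldl_nil]
    rw [show ls.length - y0 = 0 from by omega]
    simp
  | cons l rest ih =>
    intro y0 hrows tot d hd
    have hy0 : y0 < ls.length := by
      have hlen := congrArg List.length hrows
      simp only [List.length_cons, List.length_drop] at hlen
      omega
    have hl : l.toList = (ls.getD y0 "").toList.drop 0 := by
      have h0 := List.getElem?_drop (xs := ls) (i := y0) (j := 0)
      rw [← hrows] at h0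
      simp only [List.getElem?_cons_zero, Nat.add_zero] at h0
      rw [List.getElem?_eq_getElem hy0] at h0
      injection h0 with h0
      rw [List.drop_zero, List.getD_eq_getElem ls "" hy0, h0]
    have hrest : rest = ls.drop (y0 + 1) := by
      rw [← List.tail_drop, ← hrows]
      rfl
    have hd0 : ∀ x : Int, d.getD x 0 = pvMid ls y0 0 x := by
      intro x
      rw [hd x]
      unfold pvMid
      rw [if_neg (by rintro ⟨h1, h2⟩; simp at h2; omega)]
    obtain ⟨h1, h2⟩ := pv_B_row ls y0 hy0 l.toList 0 hl tot d hd0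
    simp only [Nat.cast_zero] at h1 h2
    rw [PySem.List.enumerate_cons, List.foldl_cons]
    have hcast : ((y0 : Int) + 1) = (((y0 + 1 : Nat)) : Int) := by push_cast; ring
    have hinv : ∀ x : Int, ((PySem.List.enumerate l.toList ((0 : Nat) : Int)).foldl
        (fun acc xc =>
          if xc.2 = '#' then (acc.1, acc.2.insert xc.1 (((y0 : Int)) + 1))
          else if xc.2 = 'O' then
            (acc.1 + ((ls.length : Int) - acc.2.getD xc.1 0), acc.2.insert xc.1 (acc.2.getD xc.1 0 + 1))
          else acc)
        (tot, d)).2.getD x 0 = pvLnd ls x (y0 + 1) := by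
      intro x
      have := pv_B_row ls y0 hy0 l.toList 0 hl tot d hd0
      rw [this.2 x, pv_mid_full ls y0 x]
    simp only [Nat.cast_zero] at hinv
    rw [show PySem.List.enumerate rest ((y0 : Int) + 1)
        = PySem.List.enumerate rest (((y0 + 1 : Nat)) : Int) from by rw [hcast]]
    rw [← Prod.mk.eta (p := (PySem.List.enumerate l.toList 0).foldl _ (tot, d))]
    rw [ih (y0 + 1) hrest _ _ hinv]
    rw [h1, pvTail_zero]
    rw [show ls.length - y0 = (ls.length - (y0 + 1)) + 1 from by omega, List.range'_succ,
      List.map_cons, List.sum_cons]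
    ring

theorem pv_alt_eq (data : String) : aoc_alt data = pvTotal (pvLines data) := by
  simp only [aoc_alt, PySem.List.len_eq]
  have h := pv_B_rows (pvLines data) (pvLines data) 0 (by simp) 0 PySem.Dict.empty
    (fun x => by rw [PySem.Dict.getD_empty, pvLnd_zero])
  simp only [Nat.cast_zero] at h
  rw [show (PySem.Str.split? data "\n").getD [] = pvLines data from rfl]
  rw [h, zero_add]
  unfold pvTotal
  rw [List.range_eq_range', Nat.sub_zero]

theorem pv_main (data : String) (hPre : Pre_aoc data) : aoc data = aoc_alt data := by
  rw [pv_aoc_eq data hPre, pv_alt_eq data]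

-- ===== VERDICT (by name: the statement is the Claim_ definition above) =====
theorem aoc_spec : Claim_equal_aoc := by
  intro data _ hPre
  show aoc data = aoc_alt data
  exact pv_main data hPre
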